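-- pv_equiv track=rewrite | github.com/gbouras13/pypolca | src/pypolca/utils/fix_consensus_from_vcf.py | is_homopolymer_change
-- ===== SOURCE A (Python) =====
-- def is_homopolymer_change(ref_seq, alt_seq, homopolymer_length):
--     """
--     Check if the change between the ref and alt sequences is nothing but a homopolymer change. The
--     homopolymer_length is the minimum length of consecutive identical bases (in the ref) to be
--     considered a homopolymer.
--     """
--     if ref_seq == alt_seq:
--         return False
--
--     ref = run_length_encoding(ref_seq)
--     alt = run_length_encoding(alt_seq)
--
--     # The sequence of bases (ignoring run lengths) must be identical.
--     if [base for base, _ in ref] != [base for base, _ in alt]: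
--         return False
--
--     # Each changed run must be long enough to be considered a homopolymer.
--     for (_, ref_len), (_, alt_len) in zip(ref, alt):
--         if ref_len != alt_len and ref_len < homopolymer_length:
--             return False
--
--     return True
--
-- def run_length_encoding(seq):
--     """
--     Encodes a sequence as a list of (base, length) tuples.
--     Example: "AAACCGG" -> [('A', 3), ('C', 2), ('G', 2)]
--     """
--     if not seq:
--         return []
--     runs, prev, count = [], seq[0], 1
--     for base in seq[1:]:
--         if base == prev:
--             count += 1
--         else:
--             runs.append((prev, count))
--             prev, count = base, 1
--     runs.append((prev, count))
--     return runs
-- ===== SOURCE B (Python) =====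
-- def is_homopolymer_change(ref_seq, alt_seq, homopolymer_length):
--     if ref_seq == alt_seq:
--         return False
--     i = j = 0
--     n, m = len(ref_seq), len(alt_seq)
--     while i < n and j < m:
--         c = ref_seq[i]
--         if c != alt_seq[j]:
--             return False
--         ri = i + 1
--         while ri < n and ref_seq[ri] == c:
--             ri += 1
--         rj = j + 1
--         while rj < m and alt_seq[rj] == c:
--             rj += 1
--         if (ri - i) != (rj - j) and (ri - i) < homopolymer_length:
--             return False
--         i, j = ri, rj
--     return i == n and j == m
-- ===== Notes on version B (the rewrite author's own statement) =====
-- stated objective: faster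
-- what changed: B replaces A's build-two-RLE-lists-then-compare-twice approach with a single two-pointer scan over both strings that checks run bases and lengths in one pass, returning early and materialising no lists.
import Mathlib
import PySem

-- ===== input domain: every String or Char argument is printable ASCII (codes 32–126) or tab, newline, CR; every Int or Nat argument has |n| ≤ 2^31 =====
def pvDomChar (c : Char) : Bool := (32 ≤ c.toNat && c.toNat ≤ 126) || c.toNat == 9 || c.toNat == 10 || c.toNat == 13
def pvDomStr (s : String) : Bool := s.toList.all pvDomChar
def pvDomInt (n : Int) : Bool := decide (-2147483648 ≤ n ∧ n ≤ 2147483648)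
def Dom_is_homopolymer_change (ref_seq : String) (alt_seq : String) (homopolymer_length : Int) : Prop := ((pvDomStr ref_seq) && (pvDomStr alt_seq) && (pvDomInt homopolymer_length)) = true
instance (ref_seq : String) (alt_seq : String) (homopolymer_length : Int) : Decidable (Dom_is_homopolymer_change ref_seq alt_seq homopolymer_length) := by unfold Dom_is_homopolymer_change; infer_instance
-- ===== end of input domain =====

-- B replaces A's build-two-RLE-lists-then-compare-twice approach with a single two-pointer
-- scan over both strings (no intermediate lists); same asymptotic cost, different decomposition.

-- ===== PORT A =====
-- run_length_encoding: fold over the tail with state (runs, prev, count), exactly as A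
def rleA (l : List Char) : List (Char × Int) :=
  match l with
  | [] => []
  | c :: rest =>
    let s := rest.foldl
      (fun (st : List (Char × Int) × Char × Int) base =>
        if base == st.2.1 then (st.1, st.2.1, st.2.2 + 1)
        else (st.1 ++ [(st.2.1, st.2.2)], base, 1)) ([], c, 1)
    s.1 ++ [(s.2.1, s.2.2)]

def is_homopolymer_change (ref_seq : String) (alt_seq : String) (homopolymer_length : Int) : Bool :=
  if ref_seq == alt_seq then false
  else
    let ref := rleA ref_seq.toList
    let alt := rleA alt_seq.toList
    if ref.map Prod.fst ≠ alt.map Prod.fst then false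
    else (ref.zip alt).all (fun p => decide ¬(p.1.2 ≠ p.2.2 ∧ p.1.2 < homopolymer_length))

-- ===== PORT B =====
-- two-pointer scan: current chars must agree, measure both runs, check, skip past them
def scanB (h : Int) : List Char → List Char → Bool
  | [], [] => true
  | [], _ :: _ => false
  | _ :: _, [] => false
  | x :: xs, y :: ys =>
    if x ≠ y then false
    else
      let nr := (xs.takeWhile (· == x)).length
      let na := (ys.takeWhile (· == x)).length
      if ((nr : Int) + 1 ≠ (na : Int) + 1) ∧ ((nr : Int) + 1 < h) then false
      else scanB h (xs.dropWhile (· == x)) (ys.dropWhile (· == x))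
termination_by l1 _ => l1.length
decreasing_by
  have := List.length_dropWhile_le (· == x) xs
  simp only [List.length_cons]; omega

def is_homopolymer_change_alt (ref_seq : String) (alt_seq : String) (homopolymer_length : Int) : Bool :=
  if ref_seq == alt_seq then false
  else scanB homopolymer_length ref_seq.toList alt_seq.toList

-- ===== PRECONDITION & SPEC =====
def Spec_is_homopolymer_change (ref_seq : String) (alt_seq : String) (homopolymer_length : Int) (out : Bool) : Prop := out = is_homopolymer_change_alt ref_seq alt_seq homopolymer_length
instance (ref_seq : String) (alt_seq : String) (homopolymer_length : Int) (out : Bool) : Decidable (Spec_is_homopolymer_change ref_seq alt_seq homopolymer_length out) := by unfold Spec_is_homopolymer_change; infer_instance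

-- ===== CLAIM (what is proved, stated in full; the proofs are below) =====
def Claim_equal_is_homopolymer_change : Prop := ∀ (ref_seq : String) (alt_seq : String) (homopolymer_length : Int), Dom_is_homopolymer_change ref_seq alt_seq homopolymer_length → Spec_is_homopolymer_change ref_seq alt_seq homopolymer_length (is_homopolymer_change ref_seq alt_seq homopolymer_length)

-- ===== LEMMAS AND PROOFS =====

-- A's fold step, named for the proofs
def rleStep (st : List (Char × Int) × Char × Int) (base : Char) : List (Char × Int) × Char × Int :=
  if base == st.2.1 then (st.1, st.2.1, st.2.2 + 1)
  else (st.1 ++ [(st.2.1, st.2.2)], base, 1)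

-- "finish" of the fold starting from empty runs
def rleF (c : Char) (k : Int) (xs : List Char) : List (Char × Int) :=
  let s := xs.foldl rleStep ([], c, k)
  s.1 ++ [(s.2.1, s.2.2)]

theorem rleA_eq_rleF (c : Char) (rest : List Char) : rleA (c :: rest) = rleF c 1 rest := rfl

theorem foldl_rleStep_prefix (xs : List Char) : ∀ (runs : List (Char × Int)) (c : Char) (k : Int),
    xs.foldl rleStep (runs, c, k) =
      (runs ++ (xs.foldl rleStep ([], c, k)).1, (xs.foldl rleStep ([], c, k)).2) := by
  induction xs with
  | nil => intro runs c k; simp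
  | cons b rest ih =>
    intro runs c k
    by_cases hb : (b == c) = true
    · simp only [List.foldl_cons, rleStep, hb]
      exact ih runs c (k + 1)
    · simp only [List.foldl_cons, rleStep, hb, Bool.false_eq_true, ite_false, List.nil_append]
      rw [ih (runs ++ [(c, k)]) b 1, ih [(c, k)] b 1]
      simp

theorem rleF_char (c : Char) (xs : List Char) : ∀ k : Int,
    rleF c k xs = (c, k + ((xs.takeWhile (· == c)).length : Int)) :: rleA (xs.dropWhile (· == c)) := by
  induction xs with
  | nil => intro k; simp [rleF, rleA]
  | cons b rest ih =>
    intro k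
    by_cases hb : (b == c) = true
    · have : rleF c k (b :: rest) = rleF c (k + 1) rest := by
        simp [rleF, rleStep, hb]
      rw [this, ih (k + 1)]
      simp [hb]
      ring_nf
    · have h1 : rleF c k (b :: rest) = (c, k) :: rleF b 1 rest := by
        simp only [rleF, List.foldl_cons, rleStep, hb, Bool.false_eq_true, ite_false,
          List.nil_append]
        rw [foldl_rleStep_prefix rest [(c, k)] b 1]
        simp
      rw [h1, ← rleA_eq_rleF]
      simp [hb]

-- main lemma: B's scan computes A's two RLE checks
theorem scan_eq (h : Int) : ∀ (n : Nat) (l1 l2 : List Char), l1.length ≤ n →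
    scanB h l1 l2 =
      (decide ((rleA l1).map Prod.fst = (rleA l2).map Prod.fst) &&
        ((rleA l1).zip (rleA l2)).all (fun p => decide ¬(p.1.2 ≠ p.2.2 ∧ p.1.2 < h))) := by
  intro n
  induction n with
  | zero =>
    intro l1 l2 hlen
    have h1 : l1 = [] := by cases l1 <;> simp_all
    subst h1
    cases l2 with
    | nil => simp [scanB, rleA]
    | cons y ys =>
      rw [rleA_eq_rleF, rleF_char]
      simp [scanB, rleA]
  | succ n ih =>
    intro l1 l2 hlen
    cases l1 with
    | nil =>
      cases l2 with
      | nil => simp [scanB, rleA]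
      | cons y ys =>
        rw [rleA_eq_rleF, rleF_char]
        simp [scanB, rleA]
    | cons x xs =>
      cases l2 with
      | nil =>
        rw [rleA_eq_rleF, rleF_char]
        simp [scanB, rleA]
      | cons y ys =>
        rw [rleA_eq_rleF x xs, rleF_char, rleA_eq_rleF y ys, rleF_char]
        by_cases hxy : x = y
        · subst hxy
          rw [scanB]
          simp only [ne_eq, not_true_eq_false, ite_false]
          set nr := (xs.takeWhile (· == x)).length with hnr
          set na := (ys.takeWhile (· == x)).length with hna
          by_cases hc : ((nr : Int) + 1 ≠ (na : Int) + 1) ∧ ((nr : Int) + 1 < h)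
          · rw [if_pos hc]
            have h1 : (1 + (nr : Int) ≠ 1 + (na : Int)) := by omega
            have h2 : (1 + (nr : Int) < h) := by omega
            simp [List.all_cons, h1, h2]
          · rw [if_neg hc]
            have hdrop : (xs.dropWhile (· == x)).length ≤ n := by
              have := List.length_dropWhile_le (· == x) xs
              simp only [List.length_cons] at hlen; omega
            rw [ih (xs.dropWhile (· == x)) (ys.dropWhile (· == x)) hdrop]
            have hmid : (decide (nr = na) || decide (h ≤ 1 + (nr : Int))) = true := by
              simp only [Bool.or_eq_true, decide_eq_true_eq]
              by_cases hnn : nr = na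
              · exact Or.inl hnn
              · right; omega
            simp only [List.zip_cons_cons, List.all_cons, List.map_cons]
            simp [hmid]
        · have hxy' : ¬((x, (1 : Int) + ((xs.takeWhile (· == x)).length : Int)).fst ::
              ((rleA (xs.dropWhile (· == x))).map Prod.fst) =
              (y, (1 : Int) + ((ys.takeWhile (· == y)).length : Int)).fst ::
              ((rleA (ys.dropWhile (· == y))).map Prod.fst)) := by
            simp [hxy]
          rw [scanB]
          simp [hxy, hxy']

theorem body_eq (r a : List Char) (h : Int) :
    (if (rleA r).map Prod.fst ≠ (rleA a).map Prod.fst then false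
     else ((rleA r).zip (rleA a)).all (fun p => decide ¬(p.1.2 ≠ p.2.2 ∧ p.1.2 < h))) =
    scanB h r a := by
  rw [scan_eq h r.length r a le_rfl]
  by_cases hm : (rleA r).map Prod.fst = (rleA a).map Prod.fst <;> simp [hm]

-- ===== VERDICT (by name: the statement is the Claim_ definition above) =====
theorem is_homopolymer_change_spec : Claim_equal_is_homopolymer_change := by
  intro ref_seq alt_seq h _
  unfold Spec_is_homopolymer_change is_homopolymer_change is_homopolymer_change_alt
  by_cases he : (ref_seq == alt_seq) = true
  · simp [he]
  · simp only [he, Bool.false_eq_true, ite_false]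
    exact body_eq ref_seq.toList alt_seq.toList h
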